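-- pv_equiv track=rewrite | github.com/sernst/pipper | pipper/versioning/serde.py | serialize_prefix
-- ===== SOURCE A (Python) =====
-- def explode(version_prefix: str) -> tuple:
--     """
--     Breaks apart a semantic version or partial semantic version string into
--     its constituent elements and returns them as a tuple of strings. Any
--     missing elements will be returned as empty strings.
--
--     :param version_prefix:
--         A semantic version or part of a semantic version, which can include
--         wildcard characters.
--     """
--     sections = []
--     remainder = version_prefix.rstrip('.')
--     for separator in ('+', '-'):
--         parts = remainder.split(separator, 1)
--         remainder = parts[0]
--         section = parts[1] if len(parts) == 2 else ''
--         sections.insert(0, section)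
--
--     parts = remainder.split('.')
--     parts.extend(['', ''])
--     sections = parts[:3] + sections
--
--     return tuple(sections)
--
-- def serialize_prefix(version_prefix: str) -> str:
--     """
--     Serializes the specified prefix into a URL/filesystem safe version that
--     can be used as a filename to store the versioned bundle.
--
--     :param version_prefix:
--         A partial or complete semantic version to be converted into its
--         URL/filesystem equivalent.
--     """
--     if version_prefix.startswith('v'):
--         return version_prefix
--
--     sections = [part.replace('.', '_') for part in explode(version_prefix)]
--     prefix = '-'.join([section for section in sections[:3] if section])
--     if sections[3]:
--         prefix += '__pre_{}'.format(sections[3])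
--     if sections[4]:
--         prefix += '__build_{}'.format(sections[4])
--
--     return 'v{}'.format(prefix) if prefix else ''
-- ===== SOURCE B (Python) =====
-- def serialize_prefix(version_prefix: str) -> str:
--     """One-pass scanner: walks the trimmed string once with a 3-state
--     machine (main/pre/build) instead of repeated split/join passes."""
--     if version_prefix.startswith('v'):
--         return version_prefix
--
--     body = []   # chars of the joined main fields (with '-' separators)
--     pre = []    # chars of the pre-release section, '.' -> '_'
--     build = []  # chars of the build section, '.' -> '_'
--     mode = 0    # 0 = main, 1 = pre, 2 = build
--     field = 0   # index of the current dotted field of the main section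
--     fresh = True  # no character of the current field emitted yet
--
--     for ch in version_prefix.rstrip('.'):
--         if mode == 2:
--             build.append('_' if ch == '.' else ch)
--         elif mode == 1:
--             if ch == '+':
--                 mode = 2
--             else:
--                 pre.append('_' if ch == '.' else ch)
--         elif ch == '+':
--             mode = 2
--         elif ch == '-':
--             mode = 1
--         elif ch == '.':
--             field += 1
--             fresh = True
--         elif field < 3:
--             if fresh and body:
--                 body.append('-')
--             body.append(ch)
--             fresh = False
--
--     prefix = ''.join(body)
--     if pre:
--         prefix += '__pre_' + ''.join(pre)
--     if build:
--         prefix += '__build_' + ''.join(build)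
--     return 'v' + prefix if prefix else ''
-- ===== Notes on version B (the rewrite author's own statement) =====
-- stated objective: alternative
-- what changed: A explodes the version with repeated split(sep,1)/split('.') passes, builds a 5-tuple, then maps, filters and joins; B walks the trimmed string once with a three-state scanner (main/pre/build) that emits the filesystem-safe output incrementally.
import Mathlib
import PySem

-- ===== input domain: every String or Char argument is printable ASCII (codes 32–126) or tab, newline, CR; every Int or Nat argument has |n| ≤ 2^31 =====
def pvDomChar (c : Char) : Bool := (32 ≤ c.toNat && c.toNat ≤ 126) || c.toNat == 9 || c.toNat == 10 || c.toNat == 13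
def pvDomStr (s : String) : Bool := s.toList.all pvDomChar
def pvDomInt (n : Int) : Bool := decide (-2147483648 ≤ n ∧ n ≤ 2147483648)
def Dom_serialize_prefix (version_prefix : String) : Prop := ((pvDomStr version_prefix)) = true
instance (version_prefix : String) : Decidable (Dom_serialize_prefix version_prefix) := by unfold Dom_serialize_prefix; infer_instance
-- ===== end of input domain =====

-- B replaces A's repeated split/join passes by a single left-to-right scan with a
-- three-state machine (alternative decomposition; same exact output).

-- ===== PORT A =====

-- helper `explode` of A; `(… .reverse.dropWhile (· == '.')).reverse` is an exact
-- hand port of `version_prefix.rstrip('.')` (PySem has no rstrip-with-chars form)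
def pvExplode (version_prefix : List Char) : List (List Char) :=
  let remainder := (version_prefix.reverse.dropWhile (· == '.')).reverse
  -- for separator in ('+', '-'): …  with sections.insert(0, section) as cons
  let st := [['+'], ['-']].foldl
    (fun (st : List (List Char) × List Char) separator =>
      let parts := PySem.Chars.splitOnMax st.2 separator 1
      let remainder := parts.headI        -- parts[0]; splitOnMax always returns ≥ 1 part
      let sect := if parts.length = 2 then parts.getD 1 [] else []
      (sect :: st.1, remainder))
    ([], remainder)
  let parts := PySem.Chars.splitOn st.2 ['.'] ++ [[], []]   -- parts.extend(['', ''])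
  parts.take 3 ++ st.1

def serialize_prefix (version_prefix : String) : String :=
  if PySem.Str.startswith version_prefix "v" then version_prefix else
  let sections := (pvExplode version_prefix.toList).map
    (fun part => PySem.Chars.replace part ['.'] ['_'])
  let prefix1 := PySem.Chars.join ['-'] ((sections.take 3).filter (fun sec => sec ≠ []))
  let prefix2 := if sections.getD 3 [] ≠ [] then prefix1 ++ "__pre_".toList ++ sections.getD 3 [] else prefix1
  let prefix3 := if sections.getD 4 [] ≠ [] then prefix2 ++ "__build_".toList ++ sections.getD 4 [] else prefix2
  if prefix3 ≠ [] then String.ofList ('v' :: prefix3) else ""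

-- ===== PORT B =====

-- the loop body of Source B's scan; state = (body, pre, build, mode, field, fresh)
def pvScanStep (st : List Char × List Char × List Char × Nat × Nat × Bool) (ch : Char) :
    List Char × List Char × List Char × Nat × Nat × Bool :=
  match st with
  | (body, pre, build, mode, field, fresh) =>
    if mode = 2 then (body, pre, build ++ [if ch = '.' then '_' else ch], mode, field, fresh)
    else if mode = 1 then
      if ch = '+' then (body, pre, build, 2, field, fresh)
      else (body, pre ++ [if ch = '.' then '_' else ch], build, mode, field, fresh)
    else if ch = '+' then (body, pre, build, 2, field, fresh)
    else if ch = '-' then (body, pre, build, 1, field, fresh)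
    else if ch = '.' then (body, pre, build, mode, field + 1, true)
    else if field < 3 then
      ((if fresh ∧ body ≠ [] then body ++ ['-'] else body) ++ [ch], pre, build, mode, field, false)
    else (body, pre, build, mode, field, fresh)

-- the final assembly lines of Source B (prefix = body; += '__pre_…'; += '__build_…'; 'v'+prefix or '')
def pvAltFinish (st : List Char × List Char × List Char × Nat × Nat × Bool) : String :=
  match st with
  | (body, pre, build, _, _, _) =>
    let prefix1 := body
    let prefix2 := if pre ≠ [] then prefix1 ++ "__pre_".toList ++ pre else prefix1
    let prefix3 := if build ≠ [] then prefix2 ++ "__build_".toList ++ build else prefix2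
    if prefix3 ≠ [] then String.ofList ('v' :: prefix3) else ""

def serialize_prefix_alt (version_prefix : String) : String :=
  if PySem.Str.startswith version_prefix "v" then version_prefix else
  -- `(… .reverse.dropWhile (· == '.')).reverse` is the exact hand port of .rstrip('.')
  pvAltFinish (((version_prefix.toList.reverse.dropWhile (· == '.')).reverse).foldl
    pvScanStep ([], [], [], 0, 0, true))

-- ===== PRECONDITION & SPEC =====
def Spec_serialize_prefix (version_prefix : String) (out : String) : Prop := out = serialize_prefix_alt version_prefix
instance (version_prefix : String) (out : String) : Decidable (Spec_serialize_prefix version_prefix out) := by unfold Spec_serialize_prefix; infer_instance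

-- ===== CLAIM (what is proved, stated in full; the proofs are below) =====
def Claim_equal_serialize_prefix : Prop := ∀ (version_prefix : String), Dom_serialize_prefix version_prefix → Spec_serialize_prefix version_prefix (serialize_prefix version_prefix)

-- ===== LEMMAS AND PROOFS =====

-- '.' → '_' on one character
def pvRepl (c : Char) : Char := if c = '.' then '_' else c

-- the three sections of the trimmed string: main / pre-release / build
def pvMainOf (cs : List Char) : List Char := cs.takeWhile (fun c => c ≠ '+' ∧ c ≠ '-')
def pvBuildOf (cs : List Char) : List Char := (cs.dropWhile (· ≠ '+')).tail
def pvPreOf (cs : List Char) : List Char := ((cs.takeWhile (· ≠ '+')).dropWhile (· ≠ '-')).tail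

-- structural form of s.split('.')
def pvFields : List Char → List (List Char)
  | [] => [[]]
  | c :: r => if c = '.' then [] :: pvFields r else (c :: (pvFields r).headI) :: (pvFields r).tail

theorem pv_fields_ne_nil (m : List Char) : pvFields m ≠ [] := by
  cases m <;> simp [pvFields] <;> split <;> simp

-- what B's scanner emits into `body` from a main-mode state, on main-section chars
def pvEmitM : List Char → Nat → Bool → Bool → List Char
  | [], _, _, _ => []
  | c :: r, fld, fr, ne =>
    if c = '.' then pvEmitM r (fld + 1) true ne
    else if fld < 3 then (if fr ∧ ne then ['-'] else []) ++ c :: pvEmitM r fld false true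
    else pvEmitM r fld fr ne

-- (body, pre, build) contributed by the rest of the string from a main-mode state
def pvMainSpec : List Char → Nat → Bool → Bool → List Char × List Char × List Char
  | [], _, _, _ => ([], [], [])
  | c :: r, fld, fr, ne =>
    if c = '+' then ([], [], r.map pvRepl)
    else if c = '-' then
      ([], (r.takeWhile (· ≠ '+')).map pvRepl, ((r.dropWhile (· ≠ '+')).tail).map pvRepl)
    else if c = '.' then pvMainSpec r (fld + 1) true ne
    else if fld < 3 then
      let t := pvMainSpec r fld false true
      ((if fr ∧ ne then ['-'] else []) ++ c :: t.1, t.2.1, t.2.2)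
    else pvMainSpec r fld fr ne

def pvGlue (ne : Bool) (j : List Char) : List Char :=
  if ne ∧ j ≠ [] then '-' :: j else j

def pvJoin (fs : List (List Char)) (k : Nat) : List Char :=
  PySem.Chars.join ['-'] ((fs.take k).filter (fun sec => sec ≠ []))

def pvFinish (body pre build : List Char) : List Char :=
  body ++ (if pre ≠ [] then "__pre_".toList ++ pre else [])
       ++ (if build ≠ [] then "__build_".toList ++ build else [])

-- ---- A-side characterisations ----

theorem pv_goMax0 (c : Char) (fuel : Nat) (l cur : List Char) (acc : List (List Char)) :
    PySem.Chars.splitOnMax.go [c] fuel 0 l cur acc = ((cur.reverse ++ l) :: acc).reverse := by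
  cases fuel <;> cases l <;> simp [PySem.Chars.splitOnMax.go]

theorem pv_goMax1 (c : Char) (l : List Char) : ∀ (fuel : Nat), l.length < fuel →
    ∀ (cur : List Char) (acc : List (List Char)),
    PySem.Chars.splitOnMax.go [c] fuel 1 l cur acc =
      if c ∈ l then
        ((cur.reverse ++ l.takeWhile (· ≠ c)) :: acc).reverse ++ [(l.dropWhile (· ≠ c)).tail]
      else ((cur.reverse ++ l) :: acc).reverse := by
  induction l with
  | nil =>
    intro fuel h cur acc
    cases fuel with
    | zero => omega
    | succ f => simp [PySem.Chars.splitOnMax.go]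
  | cons x r ih =>
    intro fuel h cur acc
    cases fuel with
    | zero => omega
    | succ f =>
      by_cases hx : x = c
      · subst hx
        simp [PySem.Chars.splitOnMax.go, List.isPrefixOf, pv_goMax0]
      · simp only [PySem.Chars.splitOnMax.go, List.isPrefixOf, Ne.symm hx]
        simp only [List.mem_cons, hx]
        rw [ih f (by simpa using h)]
        have hcx : c ≠ x := Ne.symm hx
        by_cases hc : c ∈ r <;>
          simp [hc, hx, hcx, List.takeWhile_cons, List.dropWhile_cons]

theorem pv_goS (l : List Char) : ∀ (fuel : Nat), l.length < fuel →
    ∀ (cur : List Char) (acc : List (List Char)),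
    PySem.Chars.splitOn.go ['.'] fuel l cur acc
      = acc.reverse ++ (cur.reverse ++ (pvFields l).headI) :: (pvFields l).tail := by
  induction l with
  | nil =>
    intro fuel h cur acc
    cases fuel with
    | zero => omega
    | succ f => simp [PySem.Chars.splitOn.go, pvFields]
  | cons x r ih =>
    intro fuel h cur acc
    cases fuel with
    | zero => omega
    | succ f =>
      by_cases hx : x = '.'
      · subst hx
        simp only [PySem.Chars.splitOn.go, List.isPrefixOf]
        rw [if_pos (by simp)]
        have hdrop : List.drop ['.'].length ('.' :: r) = r := rfl
        rw [hdrop, ih f (by simpa using h)]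
        obtain ⟨a, t, ht⟩ : ∃ a t, pvFields r = a :: t :=
          List.exists_cons_of_ne_nil (pv_fields_ne_nil r)
        simp [pvFields, ht]
      · simp only [PySem.Chars.splitOn.go, List.isPrefixOf]
        rw [if_neg (by simp [Ne.symm hx])]
        rw [ih f (by simpa using h)]
        simp [pvFields, hx]

theorem pv_goR (l : List Char) : ∀ (fuel : Nat), l.length ≤ fuel → ∀ (acc : List Char),
    PySem.Chars.replace.go ['.'] ['_'] fuel l acc = acc.reverse ++ l.map pvRepl := by
  induction l with
  | nil =>
    intro fuel h acc
    cases fuel <;> simp [PySem.Chars.replace.go]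
  | cons x r ih =>
    intro fuel h acc
    cases fuel with
    | zero => simp at h
    | succ f =>
      by_cases hx : x = '.'
      · subst hx
        simp only [PySem.Chars.replace.go, List.isPrefixOf]
        rw [if_pos (by simp)]
        have hdrop : List.drop ['.'].length ('.' :: r) = r := rfl
        rw [hdrop, ih f (by simpa using h)]
        simp [pvRepl]
      · simp only [PySem.Chars.replace.go, List.isPrefixOf]
        rw [if_neg (by simp [Ne.symm hx])]
        rw [ih f (by simpa using h)]
        simp [pvRepl, hx]

theorem pv_splitOnMax_single (c : Char) (cs : List Char) :
    PySem.Chars.splitOnMax cs [c] 1 =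
      if c ∈ cs then [cs.takeWhile (· ≠ c), (cs.dropWhile (· ≠ c)).tail] else [cs] := by
  rw [PySem.Chars.splitOnMax]
  norm_num
  rw [pv_goMax1 c cs (cs.length + 1) (by omega)]
  split <;> simp

theorem pv_splitOn_single (cs : List Char) :
    PySem.Chars.splitOn cs ['.'] = pvFields cs := by
  rw [PySem.Chars.splitOn, pv_goS cs (cs.length + 1) (by omega)]
  obtain ⟨a, t, ht⟩ : ∃ a t, pvFields cs = a :: t :=
    List.exists_cons_of_ne_nil (pv_fields_ne_nil cs)
  simp [ht]

theorem pv_replace_single (cs : List Char) :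
    PySem.Chars.replace cs ['.'] ['_'] = cs.map pvRepl := by
  rw [PySem.Chars.replace]
  simp [pv_goR cs cs.length le_rfl]

theorem pv_tw_and (rem : List Char) :
    List.takeWhile (fun c => !decide (c = '+') && !decide (c = '-')) rem
      = List.takeWhile (fun x => !decide (x = '-'))
          (List.takeWhile (fun x => !decide (x = '+')) rem) := by
  induction rem with
  | nil => simp
  | cons a l ih =>
    by_cases h1 : a = '+' <;> by_cases h2 : a = '-' <;>
      simp [List.takeWhile_cons, h1, h2, ih]

theorem pv_explode_eq (cs : List Char) :
    pvExplode cs =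
      (pvFields (pvMainOf ((cs.reverse.dropWhile (· == '.')).reverse)) ++ [[], []]).take 3
        ++ [pvPreOf ((cs.reverse.dropWhile (· == '.')).reverse),
            pvBuildOf ((cs.reverse.dropWhile (· == '.')).reverse)] := by
  unfold pvExplode
  generalize (cs.reverse.dropWhile (· == '.')).reverse = rem
  simp only [List.foldl_cons, List.foldl_nil, pv_splitOnMax_single, pv_splitOn_single]
  unfold pvMainOf pvPreOf pvBuildOf
  by_cases hp : '+' ∈ rem
  · simp only [hp, if_pos, List.headI, List.length_cons, List.length_nil, List.getD]
    by_cases hm : '-' ∈ List.takeWhile (fun x => !decide (x = '+')) rem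
    · simp [hm, pv_tw_and]
    · have h1 : List.takeWhile (fun x => !decide (x = '-'))
          (List.takeWhile (fun x => !decide (x = '+')) rem)
          = List.takeWhile (fun x => !decide (x = '+')) rem :=
        List.takeWhile_eq_self_iff.mpr (by intro a ha; simp; intro h; subst h; exact hm ha)
      have h2 : List.dropWhile (fun x => !decide (x = '-'))
          (List.takeWhile (fun x => !decide (x = '+')) rem) = [] :=
        List.dropWhile_eq_nil_iff.mpr (by intro a ha; simp; intro h; subst h; exact hm ha)
      simp [hm, pv_tw_and, h1, h2]
  · have h3 : List.takeWhile (fun x => !decide (x = '+')) rem = rem :=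
      List.takeWhile_eq_self_iff.mpr (by intro a ha; simp; intro h; subst h; exact hp ha)
    have h4 : List.dropWhile (fun x => !decide (x = '+')) rem = [] :=
      List.dropWhile_eq_nil_iff.mpr (by intro a ha; simp; intro h; subst h; exact hp ha)
    simp only [hp, if_neg, if_false, List.headI, List.length_cons, List.length_nil]
    by_cases hm : '-' ∈ rem
    · simp [hm, pv_tw_and, h3, h4]
    · have h5 : List.takeWhile (fun x => !decide (x = '-')) rem = rem :=
        List.takeWhile_eq_self_iff.mpr (by intro a ha; simp; intro h; subst h; exact hm ha)
      have h6 : List.dropWhile (fun x => !decide (x = '-')) rem = [] :=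
        List.dropWhile_eq_nil_iff.mpr (by intro a ha; simp; intro h; subst h; exact hm ha)
      simp [hm, pv_tw_and, h3, h4, h5, h6]

-- ---- B-side characterisations ----

theorem pv_scan_build (l : List Char) : ∀ (body pre build : List Char) (fld : Nat) (fr : Bool),
    l.foldl pvScanStep (body, pre, build, 2, fld, fr)
      = (body, pre, build ++ l.map pvRepl, 2, fld, fr) := by
  induction l with
  | nil => intro body pre build fld fr; simp
  | cons c r ih =>
    intro body pre build fld fr
    have hstep : pvScanStep (body, pre, build, 2, fld, fr) c
        = (body, pre, build ++ [pvRepl c], 2, fld, fr) := by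
      simp [pvScanStep, pvRepl]
    rw [List.foldl_cons, hstep, ih]
    simp

theorem pv_scan_pre (l : List Char) : ∀ (body pre build : List Char) (fld : Nat) (fr : Bool),
    l.foldl pvScanStep (body, pre, build, 1, fld, fr)
      = (body, pre ++ (l.takeWhile (· ≠ '+')).map pvRepl,
         build ++ ((l.dropWhile (· ≠ '+')).tail).map pvRepl,
         (if '+' ∈ l then 2 else 1), fld, fr) := by
  induction l with
  | nil => intro body pre build fld fr; simp
  | cons c r ih =>
    intro body pre build fld fr
    by_cases hc : c = '+'
    · subst hc
      have hstep : pvScanStep (body, pre, build, 1, fld, fr) '+'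
          = (body, pre, build, 2, fld, fr) := by simp [pvScanStep]
      rw [List.foldl_cons, hstep, pv_scan_build]
      simp
    · have hstep : pvScanStep (body, pre, build, 1, fld, fr) c
          = (body, pre ++ [pvRepl c], build, 1, fld, fr) := by
        simp [pvScanStep, pvRepl, hc]
      rw [List.foldl_cons, hstep, ih]
      simp [List.takeWhile_cons, List.dropWhile_cons, hc, Ne.symm hc]

-- assembled output of a final scanner state
def pvOut (st : List Char × List Char × List Char × Nat × Nat × Bool) : List Char :=
  pvFinish st.1 st.2.1 st.2.2.1

theorem pv_scan_main (l : List Char) : ∀ (body : List Char) (fld : Nat) (fr : Bool),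
    pvOut (l.foldl pvScanStep (body, [], [], 0, fld, fr))
      = pvFinish (body ++ (pvMainSpec l fld fr (decide (body ≠ []))).1)
          (pvMainSpec l fld fr (decide (body ≠ []))).2.1
          (pvMainSpec l fld fr (decide (body ≠ []))).2.2 := by
  induction l with
  | nil => intro body fld fr; simp [pvMainSpec, pvOut, pvFinish]
  | cons c r ih =>
    intro body fld fr
    by_cases h1 : c = '+'
    · subst h1
      have hstep : pvScanStep (body, [], [], 0, fld, fr) '+'
          = (body, [], [], 2, fld, fr) := by simp [pvScanStep]
      rw [List.foldl_cons, hstep, pv_scan_build]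
      simp [pvMainSpec, pvOut]
    · by_cases h2 : c = '-'
      · subst h2
        have hstep : pvScanStep (body, [], [], 0, fld, fr) '-'
            = (body, [], [], 1, fld, fr) := by simp [pvScanStep]
        rw [List.foldl_cons, hstep, pv_scan_pre]
        simp [pvMainSpec, pvOut]
      · by_cases h3 : c = '.'
        · subst h3
          have hstep : pvScanStep (body, [], [], 0, fld, fr) '.'
              = (body, [], [], 0, fld + 1, true) := by simp [pvScanStep, h1, h2]
          rw [List.foldl_cons, hstep, ih]
          simp [pvMainSpec, h1, h2]
        · by_cases h4 : fld < 3
          · have hstep : pvScanStep (body, [], [], 0, fld, fr) c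
                = ((if fr = true ∧ body ≠ [] then body ++ ['-'] else body) ++ [c],
                   [], [], 0, fld, false) := by
              simp [pvScanStep, h1, h2, h3, h4]
            rw [List.foldl_cons, hstep, ih]
            by_cases h5 : fr = true <;> by_cases h6 : body = [] <;>
              simp [pvMainSpec, h1, h2, h3, h4, h5, h6, pvFinish]
          · have hstep : pvScanStep (body, [], [], 0, fld, fr) c
                = (body, [], [], 0, fld, fr) := by
              simp [pvScanStep, h1, h2, h3, h4]
            rw [List.foldl_cons, hstep, ih]
            simp [pvMainSpec, h1, h2, h3, h4]

-- ---- connecting the two ----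

theorem pv_mainSpec_eq (cs : List Char) : ∀ (fld : Nat) (fr ne : Bool),
    pvMainSpec cs fld fr ne
      = (pvEmitM (pvMainOf cs) fld fr ne, (pvPreOf cs).map pvRepl, (pvBuildOf cs).map pvRepl) := by
  induction cs with
  | nil => intro fld fr ne; simp [pvMainSpec, pvMainOf, pvPreOf, pvBuildOf, pvEmitM]
  | cons c r ih =>
    intro fld fr ne
    by_cases h1 : c = '+'
    · subst h1
      simp [pvMainSpec, pvMainOf, pvPreOf, pvBuildOf, pvEmitM, List.takeWhile_cons,
        List.dropWhile_cons]
    · by_cases h2 : c = '-'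
      · subst h2
        simp [pvMainSpec, pvMainOf, pvPreOf, pvBuildOf, pvEmitM, List.takeWhile_cons,
          List.dropWhile_cons]
      · by_cases h3 : c = '.'
        · subst h3
          simp only [pvMainSpec, if_neg h1, if_neg h2, if_pos rfl, ih]
          simp [pvMainOf, pvPreOf, pvBuildOf, pvEmitM, List.takeWhile_cons,
            List.dropWhile_cons, h1, h2]
        · by_cases h4 : fld < 3
          · simp only [pvMainSpec, if_neg h1, if_neg h2, if_neg h3, if_pos h4, ih]
            simp [pvMainOf, pvPreOf, pvBuildOf, pvEmitM, List.takeWhile_cons,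
              List.dropWhile_cons, h1, h2, h3, h4]
          · simp only [pvMainSpec, if_neg h1, if_neg h2, if_neg h3, if_neg h4, ih]
            simp [pvMainOf, pvPreOf, pvBuildOf, pvEmitM, List.takeWhile_cons,
              List.dropWhile_cons, h1, h2, h3, h4]

theorem pv_emitM_ge (m : List Char) : ∀ (fld : Nat) (fr ne : Bool), 3 ≤ fld →
    pvEmitM m fld fr ne = [] := by
  induction m with
  | nil => intro fld fr ne h; simp [pvEmitM]
  | cons c r ih =>
    intro fld fr ne h
    by_cases h3 : c = '.'
    · subst h3; simp only [pvEmitM, if_pos rfl]; exact ih _ _ _ (by omega)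
    · simp only [pvEmitM, if_neg h3, if_neg (by omega : ¬ fld < 3)]; exact ih _ _ _ h

theorem pv_join_nil : PySem.Chars.join ['-'] [] = [] := by
  simp [PySem.Chars.join, List.intercalate]

theorem pv_join_single (x : List Char) : PySem.Chars.join ['-'] [x] = x := by
  simp [PySem.Chars.join, List.intercalate]

theorem pv_join_cons₂ (x y : List Char) (L : List (List Char)) :
    PySem.Chars.join ['-'] (x :: y :: L) = x ++ '-' :: PySem.Chars.join ['-'] (y :: L) := by
  simp [PySem.Chars.join, List.intercalate, List.intersperse]

theorem pv_join_ne_nil (y : List Char) (L : List (List Char)) (hy : y ≠ []) :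
    PySem.Chars.join ['-'] (y :: L) ≠ [] := by
  cases L with
  | nil => simpa [pv_join_single] using hy
  | cons z L' => simp [pv_join_cons₂, hy]

theorem pv_join_zero (fs : List (List Char)) : pvJoin fs 0 = [] := by
  simp [pvJoin, pv_join_nil]

theorem pv_join_empty_head (t : List (List Char)) (k : Nat) (hk : 1 ≤ k) :
    pvJoin ([] :: t) k = pvJoin t (k - 1) := by
  obtain ⟨k', rfl⟩ : ∃ k', k = k' + 1 := ⟨k - 1, by omega⟩
  simp [pvJoin]

theorem pv_join_cons_head (a : List Char) (t : List (List Char)) (k : Nat)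
    (hk : 1 ≤ k) (ha : a ≠ []) :
    pvJoin (a :: t) k = a ++ pvGlue true (pvJoin t (k - 1)) := by
  obtain ⟨k', rfl⟩ : ∃ k', k = k' + 1 := ⟨k - 1, by omega⟩
  simp only [pvJoin, List.take_succ_cons, List.filter_cons, Nat.add_sub_cancel]
  rw [if_pos (by simpa using ha)]
  cases hL : (List.take k' t).filter (fun sec => decide (sec ≠ [])) with
  | nil => simp [pv_join_single, pvGlue, pv_join_nil]
  | cons y L' =>
    have hy : y ≠ [] := by
      have hmem : y ∈ (List.take k' t).filter (fun sec => decide (sec ≠ [])) := by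
        rw [hL]; exact List.mem_cons_self
      simpa using (List.mem_filter.mp hmem).2
    rw [pv_join_cons₂]
    simp [pvGlue, pv_join_ne_nil y L' hy]

theorem pv_emitM_split (m : List Char) : ∀ (fld : Nat), fld < 3 →
    (∀ ne, pvEmitM m fld true ne = pvGlue ne (pvJoin (pvFields m) (3 - fld))) ∧
    (pvEmitM m fld false true
      = (pvFields m).headI ++ pvGlue true (pvJoin (pvFields m).tail (2 - fld))) := by
  induction m with
  | nil =>
    intro fld h
    constructor
    · intro ne
      have : pvJoin (pvFields ([] : List Char)) (3 - fld) = [] := by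
        obtain ⟨k', hk⟩ : ∃ k', 3 - fld = k' + 1 := ⟨2 - fld, by omega⟩
        simp [pvFields, pvJoin, hk, pv_join_nil]
      simp [pvEmitM, this, pvGlue]
    · simp [pvEmitM, pvFields, pv_join_zero, pvJoin, pvGlue, pv_join_nil]
  | cons c r ih =>
    intro fld h
    by_cases h3 : c = '.'
    · subst h3
      have hfe : pvFields ('.' :: r) = [] :: pvFields r := by simp [pvFields]
      constructor
      · intro ne
        rw [hfe, pv_join_empty_head _ _ (by omega)]
        simp only [pvEmitM, if_pos rfl]
        by_cases h5 : fld + 1 < 3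
        · rw [(ih (fld + 1) h5).1 ne]
          have heq : (3:Nat) - (fld + 1) = 3 - fld - 1 := by omega
          rw [heq]
          simp
        · have hf2 : fld = 2 := by omega
          rw [pv_emitM_ge _ _ _ _ (by omega)]
          have : (3 : Nat) - fld - 1 = 0 := by omega
          rw [this, pv_join_zero]
          simp [pvGlue]
      · rw [hfe, List.headI, List.tail]
        simp only [pvEmitM, if_pos rfl, List.nil_append]
        by_cases h5 : fld + 1 < 3
        · rw [(ih (fld + 1) h5).1 true]
          have heq : (3:Nat) - (fld + 1) = 2 - fld := by omega
          rw [heq]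
          simp
        · rw [pv_emitM_ge _ _ _ _ (by omega)]
          have : (2 : Nat) - fld = 0 := by omega
          rw [this, pv_join_zero]
          simp [pvGlue]
    · have hfe : pvFields (c :: r)
          = (c :: (pvFields r).headI) :: (pvFields r).tail := by simp [pvFields, h3]
      constructor
      · intro ne
        simp only [pvEmitM, if_neg h3, if_pos h]
        rw [(ih fld h).2, hfe, pv_join_cons_head _ _ _ (by omega) (by simp)]
        have h21 : (3 : Nat) - fld - 1 = 2 - fld := by omega
        rw [h21]
        cases ne <;> simp [pvGlue]
      · simp only [pvEmitM, if_neg h3, if_pos h]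
        rw [(ih fld h).2, hfe, List.headI, List.tail]
        simp [pvGlue]

theorem pv_emitM_fresh (m : List Char) (fld : Nat) (ne : Bool) (h : fld < 3) :
    pvEmitM m fld true ne = pvGlue ne (pvJoin (pvFields m) (3 - fld)) :=
  (pv_emitM_split m fld h).1 ne

theorem pv_fields_no_dot (m : List Char) : ∀ f ∈ pvFields m, '.' ∉ f := by
  induction m with
  | nil => simp [pvFields]
  | cons c r ih =>
    by_cases h3 : c = '.'
    · subst h3; simp only [pvFields, if_pos rfl]
      intro f hf
      rcases List.mem_cons.mp hf with hf | hf
      · simp [hf]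
      · exact ih f hf
    · simp only [pvFields, if_neg h3]
      intro f hf
      rcases List.mem_cons.mp hf with hf | hf
      · subst hf
        obtain ⟨a, t, ht⟩ : ∃ a t, pvFields r = a :: t :=
          List.exists_cons_of_ne_nil (pv_fields_ne_nil r)
        have := ih a (by simp [ht])
        simp only [ht, List.headI, List.mem_cons]
        rintro (h | h)
        · exact h3 h.symm
        · exact this h
      · exact ih f (List.mem_of_mem_tail hf)

theorem pv_take_pad (xs : List (List Char)) :
    ((xs ++ [[], []]).take 3).filter (fun sec => sec ≠ [])
      = (xs.take 3).filter (fun sec => sec ≠ []) := by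
  match xs with
  | [] => simp
  | [a] => by_cases ha : a = [] <;> simp [ha]
  | [a, b] => by_cases ha : a = [] <;> by_cases hb : b = [] <;> simp [ha, hb]
  | a :: b :: c :: rest => simp

-- ===== VERDICT (by name: the statement is the Claim_ definition above) =====
theorem pv_alt_assemble (st : List Char × List Char × List Char × Nat × Nat × Bool) :
    pvAltFinish st = (if pvOut st ≠ [] then String.ofList ('v' :: pvOut st) else "") := by
  obtain ⟨body, pre, build, mo, fl, fr⟩ := st
  by_cases hp : pre = [] <;> by_cases hb : build = [] <;>
    simp [pvAltFinish, pvOut, pvFinish, hp, hb]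

theorem serialize_prefix_spec : Claim_equal_serialize_prefix := by
  unfold Claim_equal_serialize_prefix
  intro s _
  unfold Spec_serialize_prefix serialize_prefix serialize_prefix_alt
  by_cases hv : PySem.Str.startswith s "v" = true
  · have hv' : PySem.Chars.startswith s.toList ['v'] = true := by simpa using hv
    simp [hv, hv']
  · rw [if_neg hv, if_neg hv, pv_explode_eq, pv_alt_assemble, pv_scan_main]
    set t := (s.toList.reverse.dropWhile (· == '.')).reverse with ht
    set m := pvMainOf t with hm
    rw [pv_mainSpec_eq]
    have hlen : 1 ≤ (pvFields m).length := by
      obtain ⟨a, t', h⟩ := List.exists_cons_of_ne_nil (pv_fields_ne_nil m)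
      simp [h]
    have hlen3 : ((pvFields m ++ [[], []]).take 3).length = 3 := by
      simp
      omega
    obtain ⟨a, b, c, habc⟩ := List.length_eq_three.mp hlen3
    have hid : ∀ x ∈ [a, b, c], PySem.Chars.replace x ['.'] ['_'] = x := by
      intro x hx
      rw [pv_replace_single]
      have hx' := List.mem_append.mp (List.mem_of_mem_take (habc ▸ hx))
      have hnd : '.' ∉ x := by
        rcases hx' with h | h
        · exact pv_fields_no_dot m x h
        · rcases List.mem_cons.mp h with h | h
          · simp [h]
          · rcases List.mem_cons.mp h with h | h
            · simp [h]
            · simp at h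
      conv_rhs => rw [← List.map_id x]
      apply List.map_congr_left
      intro cc hcc
      by_cases hcc' : cc = '.'
      · exact absurd (hcc' ▸ hcc) hnd
      · simp [pvRepl, hcc']
    have hJ : PySem.Chars.join ['-'] ([a, b, c].filter (fun sec => sec ≠ []))
        = pvJoin (pvFields m) 3 := by
      rw [pvJoin, ← pv_take_pad, habc]
    rw [habc]
    simp only [List.cons_append, List.nil_append, List.map_cons, List.map_nil]
    rw [hid a (by simp), hid b (by simp), hid c (by simp)]
    simp only [pv_replace_single, List.take_succ_cons, List.take_zero,
      List.getD_cons_succ, List.getD_cons_zero, List.nil_append]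
    rw [hJ]
    rw [show (decide (([] : List Char) ≠ [])) = false from by decide, ← hm,
      pv_emitM_fresh m 0 false (by omega)]
    have h30 : (3 : Nat) - 0 = 3 := rfl
    rw [h30]
    have hglue : pvGlue false (pvJoin (pvFields m) 3) = pvJoin (pvFields m) 3 := by
      simp [pvGlue]
    rw [hglue]
    by_cases hp : (pvPreOf t).map pvRepl = [] <;>
      by_cases hb : (pvBuildOf t).map pvRepl = [] <;>
        simp [pvFinish, hp, hb]
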